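/- GENERATED by c/gen_decode.py: decode facts of the image, one per distinct instruction byte string. -/
import UserX.DecodeImage

#decode_all Vorbis.Dec
  "01c5"  -- add ebp,eax
  "0f82a3000000"  -- jb 10bb61
  "0f84c3fdffff"  -- je 113b22
  "0f85ec000000"  -- jne 10c8b3
  "0f8e6e010000"  -- jle 116380
  "0fb64500"  -- movzx eax,BYTE PTR [rbp+0x0]
  "29da"  -- sub edx,ebx
  "408874241f"  -- mov BYTE PTR [rsp+0x1f],sil
  "4129c6"  -- sub r14d,eax
  "4183ec01"  -- sub r12d,0x1
  "4189de"  -- mov r14d,ebx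
  "41bcffffffff"  -- mov r12d,0xffffffff
  "420fbf6c6500"  -- movsx ebp,WORD PTR [rbp+r12*2+0x0]
  "4429f5"  -- sub ebp,r14d
  "4489442404"  -- mov DWORD PTR [rsp+0x4],r8d
  "4489bd14ffffff"  -- mov DWORD PTR [rbp-0xec],r15d
  "448b742438"  -- mov r14d,DWORD PTR [rsp+0x38]
  "450fb6441f21"  -- movzx r8d,BYTE PTR [r15+rbx*1+0x21]
  "4589c5"  -- mov r13d,r8d
  "46883c73"  -- mov BYTE PTR [rbx+r14*2],r15b
  "4839f0"  -- cmp rax,rsi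
  "4881c39e000000"  -- add rbx,0x9e
  "4883ec78"  -- sub rsp,0x78
  "48898560ffffff"  -- mov QWORD PTR [rbp-0xa0],rax
  "488b4c2410"  -- mov rcx,QWORD PTR [rsp+0x10]
  "488bb3d8010000"  -- mov rsi,QWORD PTR [rbx+0x1d8]
  "488d65d8"  -- lea rsp,[rbp-0x28]
  "488d7d44"  -- lea rdi,[rbp+0x44]
  "488dbb9c000000"  -- lea rdi,[rbx+0x9c]
  "488dbdd3060000"  -- lea rdi,[rbp+0x6d3]
  "48c7442440a0341000"  -- mov QWORD PTR [rsp+0x40],0x1034a0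
  "490faff4"  -- imul rsi,r12
  "4989c6"  -- mov r14,rax
  "498d7c240c"  -- lea rdi,[r12+0xc]
  "498dbd38080000"  -- lea rdi,[r13+0x838]
  "4a8d3cbd80061200"  -- lea rdi,[r15*4+0x120680]
  "4c037b10"  -- add r15,QWORD PTR [rbx+0x10]
  "4c897cdd00"  -- mov QWORD PTR [rbp+rbx*8+0x0],r15
  "4c8b742468"  -- mov r14,QWORD PTR [rsp+0x68]
  "4c8d8c2440010000"  -- lea r9,[rsp+0x140]
  "4d89ef"  -- mov r15,r13
  "50"  -- push rax
  "66410f6ec7"  -- movd xmm0,r15d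
  "664689bcac20010000"  -- mov WORD PTR [rsp+r13*4+0x120],r15w
  "740f"  -- je 112f2d
  "74ca"  -- je 112da4
  "7629"  -- jbe 111755
  "7d59"  -- jge 115cb0
  "7f82"  -- jg 115664
  "8344241801"  -- add DWORD PTR [rsp+0x18],0x1
  "83ff0f"  -- cmp edi,0xf
  "895d90"  -- mov DWORD PTR [rbp-0x70],ebx
  "89d3"  -- mov ebx,edx
  "8b4c2460"  -- mov ecx,DWORD PTR [rsp+0x60]
  "8b8568ffffff"  -- mov eax,DWORD PTR [rbp-0x98]
  "a801"  -- test al,0x1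
  "c1e018"  -- shl eax,0x18
  "c7800800c00004f3f3f3"  -- mov DWORD PTR [rax+0xc00008],0xf3f3f304
  "d1f8"  -- sar eax,1
  "e8082dffff"  -- call 104100
  "e811bcfeff"  -- call 100640
  "e81bf2feff"  -- call 100300
  "e8257affff"  -- call 100480
  "e82e41ffff"  -- call 100800
  "e838e1feff"  -- call 103d00
  "e843eefeff"  -- call 1003c0
  "e84dbbfeff"  -- call 100720
  "e858fdffff"  -- call 102380
  "e8678effff"  -- call 10d040
  "e871bcfeff"  -- call 100720
  "e87cc3ffff"  -- call 100720
  "e88814ffff"  -- call 100480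
  "e89216ffff"  -- call 100640
  "e89beafeff"  -- call 100640
  "e8a6c7ffff"  -- call 10d440
  "e8b0d0ffff"  -- call 100640
  "e8ba6dffff"  -- call 10b980
  "e8c4d7feff"  -- call 103d00
  "e8cdc0feff"  -- call 100640
  "e8d914ffff"  -- call 100800
  "e8e1dafeff"  -- call 103d00
  "e8ebcaffff"  -- call 1008e0
  "e8f470feff"  -- call 1008e0
  "e8ffd8feff"  -- call 100720
  "e941fdffff"  -- jmp 114dfa
  "e990f2ffff"  -- jmp 113b22
  "e9e5010000"  -- jmp 10de32
  "eb55"  -- jmp 10d2e4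
  "ebd4"  -- jmp 108fe1
  "f20f2cf8"  -- cvttsd2si edi,xmm0
  "f20f5cd1"  -- subsd xmm2,xmm1
  "f30f104c2404"  -- movss xmm1,DWORD PTR [rsp+0x4]
  "f30f106db8"  -- movss xmm5,DWORD PTR [rbp-0x48]
  "f30f114d00"  -- movss DWORD PTR [rbp+0x0],xmm1
  "f30f1173f0"  -- movss DWORD PTR [rbx-0x10],xmm6
  "f30f58c1"  -- addss xmm0,xmm1
  "f30f59cc"  -- mulss xmm1,xmm4
  "f30f5cfa"  -- subss xmm7,xmm2
  "f3410f116e0c"  -- movss DWORD PTR [r14+0xc],xmm5
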